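-- pv_equiv track=rewrite | github.com/fifo2019/algo_and_structures_python | Lesson_8/1.py | bin_code
-- ===== SOURCE A (Python) =====
-- def find_val(val_find, dict_input):
--     list_res = []
--     for i in dict_input:
--         if val_find in dict_input[i]:
--             list_res.append([dict_input[i][val_find], i])
--     return list_res
--
-- def bin_code(val_bin, dict_input):
--     list_res = []
--     while True:
--         temp = find_val(val_bin, dict_input)
--         if not (temp):
--             break
--         list_res.append(str(temp[0][0]))
--         val_bin = temp[0][1]
--     list_res.reverse()
--     return list_res
-- ===== SOURCE B (Python) =====
-- def bin_code(val_bin, dict_input):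
--     # One pass builds value -> (code, parent key), FIRST occurrence wins;
--     # then a recursion emits the root-most code first, so the result is
--     # produced directly in final order (no accumulator, no reverse).
--     index = {}
--     for key in dict_input:
--         for v, code in dict_input[key].items():
--             index.setdefault(v, (code, key))
--
--     def chain(v):
--         if v not in index:
--             return []
--         code, parent = index[v]
--         return chain(parent) + [str(code)]
--
--     return chain(val_bin)
-- ===== Notes on version B (the rewrite author's own statement) =====
-- stated objective: alternative
-- what changed: B builds a value->(code,parent) index in one pass and then a recursion emits codes root-first directly in final order, replacing A's iterative loop that rescans every dict per step, appends forward and reverses at the end.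
import Mathlib
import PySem

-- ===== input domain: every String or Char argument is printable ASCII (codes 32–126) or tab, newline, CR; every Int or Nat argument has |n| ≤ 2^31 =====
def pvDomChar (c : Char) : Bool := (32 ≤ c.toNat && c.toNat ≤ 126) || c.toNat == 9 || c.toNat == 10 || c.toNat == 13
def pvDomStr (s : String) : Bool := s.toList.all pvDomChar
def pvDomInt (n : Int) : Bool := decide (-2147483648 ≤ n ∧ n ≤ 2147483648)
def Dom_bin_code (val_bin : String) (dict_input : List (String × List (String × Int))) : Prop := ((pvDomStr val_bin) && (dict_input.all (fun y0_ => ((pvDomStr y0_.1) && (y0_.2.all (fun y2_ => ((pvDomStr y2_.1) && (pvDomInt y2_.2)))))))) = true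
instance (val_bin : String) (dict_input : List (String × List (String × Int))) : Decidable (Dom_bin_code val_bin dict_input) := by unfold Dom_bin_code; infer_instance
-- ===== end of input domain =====

-- B builds a value→(code, parent key) index in one pass and emits the codes by a
-- recursion that produces the result directly in final (root-first) order, replacing
-- A's while-loop that rescans all the dicts each step, appends and reverses at the end
-- (objective: alternative). When the lookup chain cycles, both Pythons diverge and
-- return nothing; the ports totalise the loop/recursion with fuel length+2, enough on
-- every input where the Python terminates.

-- ===== PORT A =====
-- `if val_find in dict_input[i]: append([dict_input[i][val_find], i])` — the membership
-- test plus lookup is ported as one match on the (first-match) dict lookup, which is exact.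
def find_val (val_find : String) (dict_input : List (String × List (String × Int))) : List (Int × String) :=
  dict_input.foldl (fun list_res i =>
    match (PySem.Dict.mk i.2).get? val_find with
    | some c => list_res ++ [(c, i.1)]
    | none => list_res) []

-- the `while True` loop of A, totalised with fuel
def bin_code_loop (dict_input : List (String × List (String × Int))) :
    Nat → String → List String → List String
  | 0, _, list_res => list_res
  | f + 1, val_bin, list_res =>
    match find_val val_bin dict_input with
    | [] => list_res
    | (c, k) :: _ => bin_code_loop dict_input f k (list_res ++ [PySem.Int.toStr c])

def bin_code (val_bin : String) (dict_input : List (String × List (String × Int))) : List String :=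
  (bin_code_loop dict_input (dict_input.length + 2) val_bin []).reverse

-- ===== PORT B =====
-- the one-pass index: first (outer key, first inner occurrence) wins (dict.setdefault)
def bin_code_alt_index (dict_input : List (String × List (String × Int))) :
    PySem.Dict String (Int × String) :=
  dict_input.foldl (fun index kv =>
    kv.2.foldl (fun index vc => index.setdefault vc.1 (vc.2, kv.1)) index)
    (PySem.Dict.mk [])

-- B's `chain` recursion (root-first, no accumulator, no reverse), totalised with fuel
def bin_code_alt_chain (index : PySem.Dict String (Int × String)) :
    Nat → String → List String
  | 0, _ => []
  | f + 1, v =>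
    match index.get? v with
    | none => []
    | some (c, k) => bin_code_alt_chain index f k ++ [PySem.Int.toStr c]

def bin_code_alt (val_bin : String) (dict_input : List (String × List (String × Int))) : List String :=
  bin_code_alt_chain (bin_code_alt_index dict_input) (dict_input.length + 2) val_bin

-- ===== PRECONDITION & SPEC =====
def Spec_bin_code (val_bin : String) (dict_input : List (String × List (String × Int))) (out : List String) : Prop := out = bin_code_alt val_bin dict_input
instance (val_bin : String) (dict_input : List (String × List (String × Int))) (out : List String) : Decidable (Spec_bin_code val_bin dict_input out) := by unfold Spec_bin_code; infer_instance

-- ===== CLAIM =====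
def Claim_equal_bin_code : Prop := ∀ (val_bin : String) (dict_input : List (String × List (String × Int))), Dom_bin_code val_bin dict_input → Spec_bin_code val_bin dict_input (bin_code val_bin dict_input)

-- ===== LEMMAS AND PROOFS =====

-- the first (code, key) match, as a structural recursion; both programs step by it
def pvFirst (v : String) : List (String × List (String × Int)) → Option (Int × String)
  | [] => none
  | kv :: rest =>
    match (PySem.Dict.mk kv.2).get? v with
    | some c => some (c, kv.1)
    | none => pvFirst v rest

theorem find_val_foldl_acc (v : String) (d : List (String × List (String × Int)))
    (acc : List (Int × String)) :
    (d.foldl (fun list_res i =>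
      match (PySem.Dict.mk i.2).get? v with
      | some c => list_res ++ [(c, i.1)]
      | none => list_res) acc)
    = acc ++ (d.foldl (fun list_res i =>
      match (PySem.Dict.mk i.2).get? v with
      | some c => list_res ++ [(c, i.1)]
      | none => list_res) []) := by
  induction d generalizing acc with
  | nil => simp
  | cons kv rest ih =>
    simp only [List.foldl_cons]
    cases h : (PySem.Dict.mk kv.2).get? v with
    | none => simpa [h] using ih acc
    | some c =>
      simp only [List.nil_append]
      rw [ih (acc ++ [(c, kv.1)]), ih [(c, kv.1)]]
      simp

theorem find_val_head? (v : String) (d : List (String × List (String × Int))) :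
    (find_val v d).head? = pvFirst v d := by
  induction d with
  | nil => rfl
  | cons kv rest ih =>
    unfold find_val at *
    simp only [List.foldl_cons]
    cases h : (PySem.Dict.mk kv.2).get? v with
    | none => simpa [pvFirst, h] using ih
    | some c =>
      rw [find_val_foldl_acc]
      simp [pvFirst, h]

-- inner pass of the index: setdefault over one inner dict, with outer key k
theorem index_inner_get (k v : String) (ps : List (String × Int))
    (idx : PySem.Dict String (Int × String)) :
    (ps.foldl (fun index vc => index.setdefault vc.1 (vc.2, k)) idx).get? v
      = (idx.get? v).or (((PySem.Dict.mk ps).get? v).map (fun c => (c, k))) := by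
  induction ps generalizing idx with
  | nil => simp [PySem.Dict.get?]
  | cons vc rest ih =>
    simp only [List.foldl_cons]
    rw [ih]
    by_cases hv : vc.1 = v
    · subst hv
      by_cases hc : idx.contains vc.1
      · have hs : (idx.get? vc.1).isSome := by
          simp only [PySem.Dict.get?, Option.isSome_map]
          rw [List.find?_isSome]
          simpa [PySem.Dict.contains, List.any_eq_true] using hc
        obtain ⟨w, hw⟩ := Option.isSome_iff_exists.mp hs
        simp only [PySem.Dict.setdefault, hc, if_true, hw, Option.some_or]
      · simp only [PySem.Dict.setdefault, hc]
        simp only [PySem.Dict.get?]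
        cases hfi : List.find? (fun p => p.1 == vc.1) idx.items <;>
          simp [hfi]
    · have hne : (vc.1 == v) = false := by simp [hv]
      by_cases hc : idx.contains vc.1
      · simp [PySem.Dict.setdefault, hc, PySem.Dict.get?, hne]
      · simp [PySem.Dict.setdefault, hc, PySem.Dict.get?, List.find?_append, hne]

theorem index_get_aux (v : String) (d : List (String × List (String × Int)))
    (idx : PySem.Dict String (Int × String)) :
    ((d.foldl (fun index kv =>
        kv.2.foldl (fun index vc => index.setdefault vc.1 (vc.2, kv.1)) index) idx).get? v)
      = (idx.get? v).or (pvFirst v d) := by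
  induction d generalizing idx with
  | nil => simp [pvFirst]
  | cons kv rest ih =>
    simp only [List.foldl_cons]
    rw [ih, index_inner_get]
    cases h : (PySem.Dict.mk kv.2).get? v with
    | none => simp [pvFirst, h]
    | some c => simp [pvFirst, h]

theorem index_get (v : String) (d : List (String × List (String × Int))) :
    (bin_code_alt_index d).get? v = pvFirst v d := by
  unfold bin_code_alt_index
  rw [index_get_aux]
  simp [PySem.Dict.get?]

-- A's accumulate-then-reverse loop equals B's root-first recursion, step for step
theorem loops_eq (d : List (String × List (String × Int))) (f : Nat) :
    ∀ (v : String) (acc : List String),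
    (bin_code_loop d f v acc).reverse
      = bin_code_alt_chain (bin_code_alt_index d) f v ++ acc.reverse := by
  induction f with
  | zero => intro v acc; simp [bin_code_loop, bin_code_alt_chain]
  | succ f ih =>
    intro v acc
    unfold bin_code_loop bin_code_alt_chain
    rw [index_get]
    cases hf : find_val v d with
    | nil =>
      have : pvFirst v d = none := by rw [← find_val_head?, hf]; rfl
      simp [this]
    | cons p t =>
      have : pvFirst v d = some p := by rw [← find_val_head?, hf]; rfl
      simp [this, ih]

theorem ports_eq (val_bin : String) (dict_input : List (String × List (String × Int))) :
    bin_code val_bin dict_input = bin_code_alt val_bin dict_input := by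
  unfold bin_code bin_code_alt
  rw [loops_eq]
  simp

-- ===== VERDICT =====
theorem bin_code_spec : Claim_equal_bin_code := by
  intro val_bin dict_input _
  unfold Spec_bin_code
  exact ports_eq val_bin dict_input
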